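-- pv_equiv track=rewrite | github.com/grasshopperTrainer/coding_practice | baekjoon/accepted/LIS 가장 긴 증가하는 부분수열/2568 전깃줄 - 2.py | solution
-- ===== SOURCE A (Python) =====
-- def solution(N, wires):
--     def binary_search(arr, v):
--         l, r = 0, len(arr)
--         while l < r:
--             mid = (r+l)//2
--             if arr[mid] <= v:   # 같으면 안됨 같으면 한칸 위의 것을 확인해야 하기 때문에 <=
--                 l, r = mid+1, r
--             else:
--                 l, r = l, mid
--         return l
--
--     # find LIS
--     wires.sort(key=lambda x: x[0])
--     series = [0] + [b for a, b in wires]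
--     LIS = [0]*(N+1)
--     cache = [0]
--     for i in range(1, N+1):
--         pos = binary_search(cache, series[i])
--         LIS[i] = pos
--         if pos >= len(cache):
--             cache.append(series[i])
--         else:
--             cache[pos] = series[i]
--     l = len(cache)-1  # length searching for
--     to_cut = []
--     for i in range(N, 0, -1):
--         if LIS[i] != l:
--             to_cut.append(series[i])
--         else:
--             l -= 1
--
--     # form answer
--     b_idx = {b: a for a, b in wires}
--     answer = [b_idx[b] for b in to_cut]
--     answer.sort()
--     return (len(answer), *answer)
-- ===== SOURCE B (Python) =====
-- def solution(N, wires):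
--     # Same return value as the patience-sorting version, computed by O(N^2) DP.
--     # Note: sorts `wires` in place, like the original.
--     wires.sort(key=lambda x: x[0])
--     series = [0] + [b for _, b in wires]
--     n = max(N, 0)
--     dp = []          # dp[i] = length of the longest non-decreasing subsequence of series[0..i] ending at i
--     L = 0            # running maximum of dp
--     for i in range(n + 1):
--         best = 1
--         for j in range(i):
--             if series[j] <= series[i]:
--                 best = max(best, dp[j] + 1)
--         dp.append(best)
--         L = max(L, best)
--     l = L - 1
--     to_cut = []
--     for i in range(n, 0, -1):
--         if dp[i] - 1 != l:
--             to_cut.append(series[i])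
--         else:
--             l -= 1
--     b_idx = {b: a for a, b in wires}
--     answer = sorted(b_idx[b] for b in to_cut)
--     return (len(answer), *answer)
-- ===== Notes on version B (the rewrite author's own statement) =====
-- stated objective: alternative
-- what changed: Replaces patience sorting with a binary search over piles by a quadratic dynamic program (dp[i] = longest non-decreasing subsequence ending at i, with a running maximum), keeping the same backtracking and answer assembly.
import Mathlib
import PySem

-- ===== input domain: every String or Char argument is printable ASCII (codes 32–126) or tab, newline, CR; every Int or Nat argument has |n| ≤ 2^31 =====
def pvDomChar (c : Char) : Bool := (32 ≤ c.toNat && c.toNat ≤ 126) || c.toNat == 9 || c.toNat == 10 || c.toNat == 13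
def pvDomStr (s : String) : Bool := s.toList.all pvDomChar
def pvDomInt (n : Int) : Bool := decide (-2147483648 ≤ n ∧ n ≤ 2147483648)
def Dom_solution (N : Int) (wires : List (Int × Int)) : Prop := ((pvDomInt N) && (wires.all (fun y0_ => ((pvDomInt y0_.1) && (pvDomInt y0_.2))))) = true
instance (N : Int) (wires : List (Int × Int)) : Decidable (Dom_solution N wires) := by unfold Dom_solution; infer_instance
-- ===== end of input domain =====

-- B computes the LIS phase by a quadratic dynamic program instead of A's patience sorting with
-- a hand-written binary search; equal RETURN values are proved (both Pythons sort `wires` in place).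

-- ===== PORT A =====
-- mid = (r+l)//2 is inlined; l, r stay in [0, len arr], so Nat division is exact
def bsGo (arr : List Int) (v : Int) (l r : Nat) : Nat :=
  if _h : l < r then
    if arr.getD ((l + r) / 2) 0 ≤ v then bsGo arr v ((l + r) / 2 + 1) r
    else bsGo arr v l ((l + r) / 2)
  else l
termination_by r - l
decreasing_by all_goals omega

def bsearch (arr : List Int) (v : Int) : Nat := bsGo arr v 0 arr.length


def aStep (series : List Int) (st : List Int × List Int) (i : Int) : List Int × List Int :=
  let v := series.getD i.toNat 0
  let pos := bsearch st.2 v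
  (st.1.set i.toNat (pos : Int),
   if pos ≥ st.2.length then st.2 ++ [v] else st.2.set pos v)

def cutStep (lis series : List Int) (st : Int × List Int) (i : Int) : Int × List Int :=
  if lis.getD i.toNat 0 ≠ st.1 then (st.1, st.2 ++ [series.getD i.toNat 0]) else (st.1 - 1, st.2)

def solution (N : Int) (wires : List (Int × Int)) : List Int :=
  let wiresS := PySem.List.sorted wires (fun x => x.1)
  let series : List Int := 0 :: wiresS.map (fun p => p.2)
  let st := (PySem.List.pyRange 1 (N + 1) 1).foldl (aStep series)
              (List.replicate (N + 1).toNat 0, [0])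
  let l0 : Int := (st.2.length : Int) - 1
  let toCut := ((PySem.List.pyRange N 0 (-1)).foldl (cutStep st.1 series) (l0, [])).2
  let bIdx := wiresS.foldl (fun d (p : Int × Int) => d.insert p.2 p.1)
                (PySem.Dict.empty : PySem.Dict Int Int)
  let answer := PySem.List.sorted (toCut.map (fun b => bIdx.getD b 0)) (fun x => x)
  (answer.length : Int) :: answer


-- ===== PORT B =====
def dpInner (series dp : List Int) (i : Nat) : Int :=
  (List.range i).foldl
    (fun best j => if series.getD j 0 ≤ series.getD i 0 then max best (dp.getD j 0 + 1) else best) 1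

def dpLoop (series : List Int) (n : Nat) : List Int × Int :=
  (List.range (n + 1)).foldl
    (fun st i => ((st.1 ++ [dpInner series st.1 i]), max st.2 (dpInner series st.1 i))) ([], 0)

def cutStepB (dp series : List Int) (st : Int × List Int) (i : Int) : Int × List Int :=
  if dp.getD i.toNat 0 - 1 ≠ st.1 then (st.1, st.2 ++ [series.getD i.toNat 0]) else (st.1 - 1, st.2)

def solution_alt (N : Int) (wires : List (Int × Int)) : List Int :=
  let wiresS := PySem.List.sorted wires (fun x => x.1)
  let series : List Int := 0 :: wiresS.map (fun p => p.2)
  let n : Nat := (max N 0).toNat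
  let st := dpLoop series n
  let toCut := ((PySem.List.pyRange (n : Int) 0 (-1)).foldl (cutStepB st.1 series) (st.2 - 1, [])).2
  let bIdx := wiresS.foldl (fun d (p : Int × Int) => d.insert p.2 p.1)
                (PySem.Dict.empty : PySem.Dict Int Int)
  let answer := PySem.List.sorted (toCut.map (fun b => bIdx.getD b 0)) (fun x => x)
  (answer.length : Int) :: answer


-- ===== PRECONDITION & SPEC =====
-- A raises IndexError (series[i] for i > len(wires)) exactly when N > len(wires); nothing else is excluded.
def Pre_solution (N : Int) (wires : List (Int × Int)) : Prop := N ≤ (wires.length : Int)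
instance (N : Int) (wires : List (Int × Int)) : Decidable (Pre_solution N wires) := by
  unfold Pre_solution; infer_instance

def pvWitness_solution : Int × (List (Int × Int)) := (3, [(1, 3), (3, 1), (2, 2)])

def Spec_solution (N : Int) (wires : List (Int × Int)) (out : List Int) : Prop := out = solution_alt N wires
instance (N : Int) (wires : List (Int × Int)) (out : List Int) : Decidable (Spec_solution N wires out) := by
  unfold Spec_solution; infer_instance

-- ===== CLAIM (what is proved, stated in full; the proofs are below) =====
def Claim_equal_solution : Prop := ∀ (N : Int) (wires : List (Int × Int)), Dom_solution N wires → Pre_solution N wires → Spec_solution N wires (solution N wires)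

-- ===== LEMMAS AND PROOFS =====

theorem sorted_getD_mono {c : List Int} (hs : c.Pairwise (· ≤ ·)) {i j : Nat}
    (hij : i ≤ j) (hj : j < c.length) : c.getD i 0 ≤ c.getD j 0 := by
  rcases Nat.eq_or_lt_of_le hij with h | h
  · subst h; exact le_refl _
  · rw [List.getD_eq_getElem c 0 (Nat.lt_trans h hj), List.getD_eq_getElem c 0 hj]
    exact List.pairwise_iff_getElem.mp hs i j _ _ h

theorem bsGo_spec (arr : List Int) (v : Int) (hs : arr.Pairwise (· ≤ ·)) :
    ∀ n l r, r - l ≤ n → l ≤ r → r ≤ arr.length →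
    (∀ k, k < l → arr.getD k 0 ≤ v) → (∀ k, r ≤ k → k < arr.length → v < arr.getD k 0) →
    l ≤ bsGo arr v l r ∧ bsGo arr v l r ≤ r ∧
      (∀ k, k < bsGo arr v l r → arr.getD k 0 ≤ v) ∧
      (∀ k, bsGo arr v l r ≤ k → k < arr.length → v < arr.getD k 0) := by
  intro n
  induction n with
  | zero =>
    intro l r hn hlr hrlen hlo hhi
    rw [bsGo, dif_neg (by omega)]
    exact ⟨le_refl _, hlr, hlo, fun k hk hklen => hhi k (by omega) hklen⟩
  | succ n ih =>
    intro l r hn hlr hrlen hlo hhi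
    rw [bsGo]
    by_cases hc : l < r
    · rw [dif_pos hc]
      by_cases hm : arr.getD ((l + r) / 2) 0 ≤ v
      · rw [if_pos hm]
        have h1 : ∀ k, k < (l + r) / 2 + 1 → arr.getD k 0 ≤ v := fun k hk =>
          le_trans (sorted_getD_mono hs (by omega) (by omega)) hm
        have := ih ((l + r) / 2 + 1) r (by omega) (by omega) hrlen h1 hhi
        exact ⟨by omega, this.2.1, this.2.2.1, this.2.2.2⟩
      · rw [if_neg hm]
        have h2 : ∀ k, (l + r) / 2 ≤ k → k < arr.length → v < arr.getD k 0 := fun k hk hklen =>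
          lt_of_lt_of_le (lt_of_not_ge hm) (sorted_getD_mono hs hk hklen)
        have := ih l ((l + r) / 2) (by omega) (by omega) (by omega) hlo h2
        exact ⟨this.1, by omega, this.2.2.1, this.2.2.2⟩
    · rw [dif_neg hc]
      exact ⟨le_refl _, hlr, hlo, fun k hk hklen => hhi k (by omega) hklen⟩

theorem bsearch_spec (c : List Int) (v : Int) (hs : c.Pairwise (· ≤ ·)) :
    bsearch c v ≤ c.length ∧
      (∀ k, k < bsearch c v → c.getD k 0 ≤ v) ∧
      (∀ k, bsearch c v ≤ k → k < c.length → v < c.getD k 0) := by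
  have := bsGo_spec c v hs c.length 0 c.length (by omega) (by omega) (le_refl _)
    (fun k hk => absurd hk (by omega)) (fun k hk hklen => absurd hklen (by omega))
  exact ⟨this.2.1, this.2.2.1, this.2.2.2⟩

def dpVec (xs : List Int) : List Int :=
  (List.range xs.length).foldl (fun dp i => dp ++ [dpInner xs dp i]) []

theorem foldl_max_if_spec (c : Nat → Prop) [DecidablePred c] (g : Nat → Int) :
    ∀ (l : List Nat) (b : Int),
    (l.foldl (fun acc j => if c j then max acc (g j) else acc) b = b ∨
      ∃ j ∈ l, c j ∧ l.foldl (fun acc j => if c j then max acc (g j) else acc) b = g j) ∧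
    b ≤ l.foldl (fun acc j => if c j then max acc (g j) else acc) b ∧
    (∀ j ∈ l, c j → g j ≤ l.foldl (fun acc j => if c j then max acc (g j) else acc) b) := by
  intro l
  induction l with
  | nil => intro b; exact ⟨Or.inl rfl, le_refl _, by simp⟩
  | cons x t ih =>
    intro b
    simp only [List.foldl_cons]
    by_cases hx : c x
    · rw [if_pos hx]
      rcases ih (max b (g x)) with ⟨hcase, hle, hall⟩
      constructor
      · rcases hcase with h | ⟨j, hj, hcj, hF⟩
        · rcases max_cases b (g x) with ⟨hm, _⟩ | ⟨hm, _⟩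
          · exact Or.inl (by rw [h, hm])
          · exact Or.inr ⟨x, List.mem_cons_self, hx, by rw [h, hm]⟩
        · exact Or.inr ⟨j, List.mem_cons_of_mem _ hj, hcj, hF⟩
      · refine ⟨le_trans (le_max_left _ _) hle, ?_⟩
        intro j hj hcj
        rcases List.mem_cons.mp hj with rfl | hj'
        · exact le_trans (le_max_right _ _) hle
        · exact hall j hj' hcj
    · rw [if_neg hx]
      rcases ih b with ⟨hcase, hle, hall⟩
      refine ⟨?_, hle, ?_⟩
      · rcases hcase with h | ⟨j, hj, hcj, hF⟩
        · exact Or.inl h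
        · exact Or.inr ⟨j, List.mem_cons_of_mem _ hj, hcj, hF⟩
      · intro j hj hcj
        rcases List.mem_cons.mp hj with rfl | hj'
        · exact absurd hcj hx
        · exact hall j hj' hcj

theorem dpInner_spec (series dp : List Int) (i : Nat) :
    (dpInner series dp i = 1 ∨
      ∃ j, j < i ∧ series.getD j 0 ≤ series.getD i 0 ∧ dpInner series dp i = dp.getD j 0 + 1) ∧
    1 ≤ dpInner series dp i ∧
    (∀ j, j < i → series.getD j 0 ≤ series.getD i 0 → dp.getD j 0 + 1 ≤ dpInner series dp i) := by
  have := foldl_max_if_spec (fun j => series.getD j 0 ≤ series.getD i 0)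
    (fun j => dp.getD j 0 + 1) (List.range i) 1
  refine ⟨?_, this.2.1, ?_⟩
  · rcases this.1 with h | ⟨j, hj, hcj, hF⟩
    · exact Or.inl h
    · exact Or.inr ⟨j, List.mem_range.mp hj, hcj, hF⟩
  · intro j hj hcj
    exact this.2.2 j (List.mem_range.mpr hj) hcj

-- generic: a fold that appends one element per index
theorem foldl_append_length (f : List Int → Nat → Int) :
    ∀ (l : List Nat) (dp : List Int),
    (l.foldl (fun dp i => dp ++ [f dp i]) dp).length = dp.length + l.length := by
  intro l
  induction l with
  | nil => simp
  | cons x t ih => intro dp; simp [ih]; omega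

theorem length_dpVec (xs : List Int) : (dpVec xs).length = xs.length := by
  unfold dpVec
  rw [foldl_append_length (fun dp i => dpInner xs dp i) (List.range xs.length) []]
  simp

theorem dpInner_congr (xs : List Int) (v : Int) (dp : List Int) (i : Nat) (hi : i < xs.length) :
    dpInner (xs ++ [v]) dp i = dpInner xs dp i := by
  unfold dpInner
  rw [List.getD_append _ _ _ _ hi]
  apply PySem.List.foldl_congr_mem
  intro acc j hj
  rw [List.getD_append _ _ _ _ (Nat.lt_trans (List.mem_range.mp hj) hi)]

theorem dpVec_append (xs : List Int) (v : Int) :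
    dpVec (xs ++ [v]) = dpVec xs ++ [dpInner (xs ++ [v]) (dpVec xs) xs.length] := by
  unfold dpVec
  rw [List.length_append, List.length_singleton, List.range_succ, List.foldl_append]
  have h : List.foldl (fun dp i => dp ++ [dpInner (xs ++ [v]) dp i]) [] (List.range xs.length)
      = List.foldl (fun dp i => dp ++ [dpInner xs dp i]) [] (List.range xs.length) := by
    apply PySem.List.foldl_congr_mem
    intro acc i hi
    rw [dpInner_congr xs v acc i (List.mem_range.mp hi)]
  rw [h, List.foldl_cons, List.foldl_nil]

theorem dpVec_getD_ge_one (xs : List Int) : ∀ j, j < xs.length → 1 ≤ (dpVec xs).getD j 0 := by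
  induction xs using List.reverseRecOn with
  | nil => intro j hj; simp at hj
  | append_singleton t v ih =>
    intro j hj
    rw [dpVec_append]
    rcases Nat.lt_or_ge j t.length with h | h
    · rw [List.getD_append _ _ _ _ (by rw [length_dpVec]; exact h)]
      exact ih j h
    · have hj' : j = t.length := by simp at hj; omega
      subst hj'
      rw [List.getD_eq_getElem?_getD, List.getElem?_append_right (by rw [length_dpVec])]
      rw [length_dpVec]
      simp
      exact (dpInner_spec _ _ _).2.1
    
theorem dpVec_getD_le_max (xs : List Int) (j : Nat) (hj : j < xs.length) :
    (dpVec xs).getD j 0 ≤ (dpVec xs).foldl max 0 := by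
  have hj' : j < (dpVec xs).length := by rw [length_dpVec]; exact hj
  rw [List.getD_eq_getElem _ _ hj']
  exact (PySem.List.le_foldl_max (dpVec xs) 0).2 _ (List.getElem_mem hj')

def patStep (c : List Int) (v : Int) : List Int :=
  if bsearch c v ≥ c.length then c ++ [v] else c.set (bsearch c v) v

def patC (xs : List Int) : List Int := xs.foldl patStep []

def PatInv (xs c : List Int) : Prop :=
  c.Pairwise (· ≤ ·) ∧
  ((c.length : Int) = (dpVec xs).foldl max 0) ∧
  ∀ k : Nat, k < c.length →
    ((∃ j, j < xs.length ∧ (dpVec xs).getD j 0 = (k : Int) + 1 ∧ xs.getD j 0 = c.getD k 0) ∧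
     (∀ j, j < xs.length → (dpVec xs).getD j 0 = (k : Int) + 1 → c.getD k 0 ≤ xs.getD j 0))

theorem getD_append_self (xs : List Int) (v d : Int) : (xs ++ [v]).getD xs.length d = v := by
  rw [List.getD_eq_getElem?_getD, List.getElem?_append_right (le_refl _)]
  simp

theorem getD_set_self (c : List Int) (m : Nat) (v : Int) (h : m < c.length) :
    (c.set m v).getD m 0 = v := by
  rw [List.getD_eq_getElem?_getD, List.getElem?_set_self h]
  rfl

theorem getD_set_ne (c : List Int) (m k : Nat) (v : Int) (h : m ≠ k) :
    (c.set m v).getD k 0 = c.getD k 0 := by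
  rw [List.getD_eq_getElem?_getD, List.getElem?_set_ne h, ← List.getD_eq_getElem?_getD]

theorem foldl_max_append_singleton (l : List Int) (d : Int) :
    (l ++ [d]).foldl max 0 = max (l.foldl max 0) d := by
  rw [List.foldl_append]
  rfl

-- the dp value of the element v appended to xs
def newd (xs : List Int) (v : Int) : Int := dpInner (xs ++ [v]) (dpVec xs) xs.length

theorem dpVec_append' (xs : List Int) (v : Int) :
    dpVec (xs ++ [v]) = dpVec xs ++ [newd xs v] := dpVec_append xs v

-- the new element's dp condition, rewritten through the append
theorem newd_spec (xs : List Int) (v : Int) :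
    (newd xs v = 1 ∨
      ∃ j, j < xs.length ∧ xs.getD j 0 ≤ v ∧ newd xs v = (dpVec xs).getD j 0 + 1) ∧
    1 ≤ newd xs v ∧
    (∀ j, j < xs.length → xs.getD j 0 ≤ v → (dpVec xs).getD j 0 + 1 ≤ newd xs v) := by
  have h := dpInner_spec (xs ++ [v]) (dpVec xs) xs.length
  rw [getD_append_self] at h
  refine ⟨?_, h.2.1, ?_⟩
  · rcases h.1 with h1 | ⟨j, hj, hcond, hval⟩
    · exact Or.inl h1
    · rw [List.getD_append _ _ _ _ hj] at hcond
      exact Or.inr ⟨j, hj, hcond, hval⟩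
  · intro j hj hcond
    exact h.2.2 j hj (by rw [List.getD_append _ _ _ _ hj]; exact hcond)

theorem pos_eq (xs c : List Int) (v : Int) (h : PatInv xs c) :
    (bsearch c v : Int) = newd xs v - 1 := by
  obtain ⟨hsort, hlen, htails⟩ := h
  obtain ⟨hble, hblo, hbhi⟩ := bsearch_spec c v hsort
  obtain ⟨hdcase, hdge, hdall⟩ := newd_spec xs v
  have hub : newd xs v - 1 ≤ (bsearch c v : Int) := by
    rcases hdcase with h1 | ⟨j, hj, hcond, hval⟩
    · omega
    · have ht1 : 1 ≤ (dpVec xs).getD j 0 := dpVec_getD_ge_one xs j hj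
      have ht2 : (dpVec xs).getD j 0 ≤ (c.length : Int) := by
        rw [hlen]; exact dpVec_getD_le_max xs j hj
      set t := (dpVec xs).getD j 0 with htdef
      have hk : ((t - 1).toNat : Int) = t - 1 := by omega
      have hklen : (t - 1).toNat < c.length := by omega
      have hck : c.getD (t - 1).toNat 0 ≤ v :=
        le_trans (htails _ hklen |>.2 j hj (by omega)) hcond
      have : (t - 1).toNat < bsearch c v := by
        by_contra hcon
        exact absurd (hbhi _ (by omega) hklen) (not_lt.mpr hck)
      omega
  have hlb : (bsearch c v : Int) ≤ newd xs v - 1 := by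
    rcases Nat.eq_zero_or_pos (bsearch c v) with h0 | hpos
    · omega
    · have hklen : bsearch c v - 1 < c.length := by omega
      have hck : c.getD (bsearch c v - 1) 0 ≤ v := hblo _ (by omega)
      obtain ⟨j, hj, hdj, hxj⟩ := (htails _ hklen).1
      have := hdall j hj (by rw [hxj]; exact hck)
      omega
  omega

theorem inv_step (xs c : List Int) (v : Int) (h : PatInv xs c) :
    PatInv (xs ++ [v]) (patStep c v) := by
  obtain ⟨hsort, hlen, htails⟩ := h
  obtain ⟨hble, hblo, hbhi⟩ := bsearch_spec c v hsort
  have hm := pos_eq xs c v ⟨hsort, hlen, htails⟩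
  have hdge := (newd_spec xs v).2.1
  have hdp_len : (dpVec xs).length = xs.length := length_dpVec xs
  have hmax' : (dpVec (xs ++ [v])).foldl max 0 = max ((dpVec xs).foldl max 0) (newd xs v) := by
    rw [dpVec_append', foldl_max_append_singleton]
  have hlen' : (xs ++ [v]).length = xs.length + 1 := by simp
  -- getD of the extended xs and dpVec
  have hxs_old : ∀ j, j < xs.length → (xs ++ [v]).getD j 0 = xs.getD j 0 := fun j hj =>
    List.getD_append _ _ _ _ hj
  have hxs_new : (xs ++ [v]).getD xs.length 0 = v := getD_append_self xs v 0
  have hdp_old : ∀ j, j < xs.length → (dpVec (xs ++ [v])).getD j 0 = (dpVec xs).getD j 0 := by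
    intro j hj
    rw [dpVec_append']
    exact List.getD_append _ _ _ _ (by omega)
  have hdp_new : (dpVec (xs ++ [v])).getD xs.length 0 = newd xs v := by
    rw [dpVec_append', ← hdp_len]
    exact getD_append_self _ _ 0
  unfold patStep
  by_cases hcase : bsearch c v ≥ c.length
  · -- append: pos = len(cache)
    have hmeq : bsearch c v = c.length := by omega
    rw [if_pos hcase]
    have hvd : newd xs v = (c.length : Int) + 1 := by omega
    refine ⟨?_, ?_, ?_⟩
    · rw [List.pairwise_append]
      refine ⟨hsort, List.pairwise_singleton _ _, ?_⟩
      intro a ha b hb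
      rw [List.mem_singleton] at hb
      subst hb
      obtain ⟨k, hk, rfl⟩ := List.mem_iff_getElem.mp ha
      rw [← List.getD_eq_getElem c 0 hk]
      exact hblo k (by omega)
    · rw [hmax', ← hlen]
      simp only [List.length_append, List.length_singleton]
      push_cast
      omega
    · intro k hk
      simp only [List.length_append, List.length_singleton] at hk
      rcases Nat.lt_or_ge k c.length with hkc | hkc
      · -- old level
        obtain ⟨⟨j, hj, hdj, hxj⟩, hall⟩ := htails k hkc
        have hgetD : (c ++ [v]).getD k 0 = c.getD k 0 := List.getD_append _ _ _ _ hkc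
        constructor
        · exact ⟨j, by omega, by rw [hdp_old j hj]; exact hdj, by
            rw [hxs_old j hj, hgetD]; exact hxj⟩
        · intro j hj' hdj'
          rw [hlen'] at hj'
          rcases Nat.lt_or_ge j xs.length with hjx | hjx
          · rw [hdp_old j hjx] at hdj'
            rw [hgetD, hxs_old j hjx]
            exact hall j hjx hdj'
          · have hjeq : j = xs.length := by omega
            subst hjeq
            rw [hdp_new] at hdj'
            omega
      · -- the new level k = c.length
        have hkeq : k = c.length := by omega
        subst hkeq
        have hgetD : (c ++ [v]).getD c.length 0 = v := getD_append_self c v 0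
        constructor
        · exact ⟨xs.length, by omega, by rw [hdp_new]; omega, by rw [hxs_new, hgetD]⟩
        · intro j hj' hdj'
          rw [hlen'] at hj'
          rcases Nat.lt_or_ge j xs.length with hjx | hjx
          · rw [hdp_old j hjx] at hdj'
            have := dpVec_getD_le_max xs j hjx
            rw [← hlen] at this
            omega
          · have hjeq : j = xs.length := by omega
            subst hjeq
            rw [hgetD, hxs_new]
  · -- replace: pos < len(cache)
    rw [if_neg hcase]
    have hmlt : bsearch c v < c.length := by omega
    have hvlt : v < c.getD (bsearch c v) 0 := hbhi _ (le_refl _) hmlt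
    refine ⟨?_, ?_, ?_⟩
    · rw [List.pairwise_iff_getElem]
      intro i j hi hj hij
      simp only [List.length_set] at hi hj
      rw [List.getElem_set, List.getElem_set]
      split_ifs with h1 h2
      · exact le_refl _
      · -- i = pos: v ≤ c[j], j > pos
        have hv : v ≤ c.getD j 0 :=
          le_trans (le_of_lt hvlt) (sorted_getD_mono hsort (by omega) hj)
        rw [List.getD_eq_getElem c 0 hj] at hv
        exact hv
      · -- j = pos: c[i] ≤ v
        have hv : c.getD i 0 ≤ v := hblo i (by omega)
        rw [List.getD_eq_getElem c 0 hi] at hv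
        exact hv
      · exact List.pairwise_iff_getElem.mp hsort i j hi hj hij
    · rw [hmax', ← hlen, List.length_set]
      omega
    · intro k hk
      rw [List.length_set] at hk
      by_cases hkm : k = bsearch c v
      · -- the replaced level
        subst hkm
        have hgetD : (c.set (bsearch c v) v).getD (bsearch c v) 0 = v :=
          getD_set_self c _ v hmlt
        constructor
        · exact ⟨xs.length, by omega, by rw [hdp_new]; omega, by rw [hxs_new, hgetD]⟩
        · intro j hj' hdj'
          rw [hlen'] at hj'
          rcases Nat.lt_or_ge j xs.length with hjx | hjx
          · rw [hdp_old j hjx] at hdj'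
            obtain ⟨_, hall⟩ := htails (bsearch c v) hmlt
            have := hall j hjx hdj'
            rw [hgetD, hxs_old j hjx]
            omega
          · have hjeq : j = xs.length := by omega
            subst hjeq
            rw [hgetD, hxs_new]
      · -- untouched levels
        have hgetD : (c.set (bsearch c v) v).getD k 0 = c.getD k 0 :=
          getD_set_ne c _ k v (fun hh => hkm hh.symm)
        obtain ⟨⟨j, hj, hdj, hxj⟩, hall⟩ := htails k hk
        constructor
        · exact ⟨j, by omega, by rw [hdp_old j hj]; exact hdj, by
            rw [hxs_old j hj, hgetD]; exact hxj⟩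
        · intro j hj' hdj'
          rw [hlen'] at hj'
          rcases Nat.lt_or_ge j xs.length with hjx | hjx
          · rw [hdp_old j hjx] at hdj'
            rw [hgetD, hxs_old j hjx]
            exact hall j hjx hdj'
          · have hjeq : j = xs.length := by omega
            subst hjeq
            rw [hdp_new] at hdj'
            omega

theorem inv_patC (xs : List Int) : PatInv xs (patC xs) := by
  induction xs using List.reverseRecOn with
  | nil =>
    refine ⟨List.Pairwise.nil, by simp [dpVec], ?_⟩
    intro k hk
    simp [patC] at hk
  | append_singleton t v ih =>
    have : patC (t ++ [v]) = patStep (patC t) v := by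
      unfold patC
      rw [List.foldl_append, List.foldl_cons, List.foldl_nil]
    rw [this]
    exact inv_step t (patC t) v ih

theorem getD_take (l : List Int) (m j : Nat) (hj : j < m) :
    (l.take m).getD j 0 = l.getD j 0 := by
  rw [List.getD_eq_getElem?_getD, List.getD_eq_getElem?_getD, List.getElem?_take, if_pos hj]

theorem dpInner_take (series dp : List Int) (m i : Nat) (hi : i < m) :
    dpInner (series.take m) dp i = dpInner series dp i := by
  unfold dpInner
  rw [getD_take series m i hi]
  apply PySem.List.foldl_congr_mem
  intro acc j hj
  rw [getD_take series m j (Nat.lt_trans (List.mem_range.mp hj) hi)]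

theorem dpVec_take (series : List Int) (m : Nat) (hm : m ≤ series.length) :
    dpVec (series.take m)
      = (List.range m).foldl (fun dp i => dp ++ [dpInner series dp i]) [] := by
  unfold dpVec
  rw [List.length_take, Nat.min_eq_left hm]
  apply PySem.List.foldl_congr_mem
  intro acc i hi
  rw [dpInner_take series acc m i (List.mem_range.mp hi)]

theorem foldl_pair_max (f : List Int → Nat → Int) :
    ∀ (l : List Nat) (dp0 : List Int) (m0 : Int), m0 = dp0.foldl max 0 →
    l.foldl (fun st i => (st.1 ++ [f st.1 i], max st.2 (f st.1 i))) (dp0, m0)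
      = (l.foldl (fun dp i => dp ++ [f dp i]) dp0,
         (l.foldl (fun dp i => dp ++ [f dp i]) dp0).foldl max 0) := by
  intro l
  induction l with
  | nil => intro dp0 m0 h; simp [h]
  | cons x t ih =>
    intro dp0 m0 h
    simp only [List.foldl_cons]
    exact ih _ _ (by rw [h, foldl_max_append_singleton])

theorem dpLoop_eq (series : List Int) (n : Nat) (h : n + 1 ≤ series.length) :
    dpLoop series n
      = (dpVec (series.take (n + 1)), (dpVec (series.take (n + 1))).foldl max 0) := by
  unfold dpLoop
  rw [foldl_pair_max (fun dp i => dpInner series dp i) (List.range (n + 1)) [] 0 rfl,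
    dpVec_take series (n + 1) h]

theorem aLoop (bs : List Int) (n : Nat) (hlen : n ≤ bs.length) :
    ∀ m, m ≤ n →
    (PySem.List.pyRange 1 ((m : Int) + 1) 1).foldl (aStep (0 :: bs))
        (List.replicate (n + 1) 0, [0])
      = ((dpVec ((0 :: bs).take (m + 1))).map (fun x => x - 1) ++ List.replicate (n - m) 0,
         patC ((0 :: bs).take (m + 1))) := by
  intro m
  induction m with
  | zero =>
    intro _
    rw [PySem.List.pyRange_one_eq_nil (by norm_num)]
    simp only [List.foldl_nil, List.take_succ_cons, List.take_zero, Nat.sub_zero]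
    have h1 : dpVec [(0 : Int)] = [1] := by
      unfold dpVec dpInner
      simp [List.range_one]
    have h2 : patC [(0 : Int)] = [0] := by
      unfold patC
      rw [List.foldl_cons, List.foldl_nil]
      unfold patStep bsearch
      rw [bsGo]
      simp
    rw [h1, h2]
    simp [List.replicate_succ]
  | succ m ih =>
    intro hm
    have hm' : m ≤ n := by omega
    have hcast : ((m + 1 : Nat) : Int) + 1 = ((m : Int) + 1) + 1 := by push_cast; ring
    rw [hcast, PySem.List.pyRange_one_succ_right (by omega), List.foldl_append,
      ih hm', List.foldl_cons, List.foldl_nil]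
    -- one step of A's loop, at index m+1
    set xs := (0 :: bs).take (m + 1) with hxs
    have hidx : m + 1 < (0 :: bs).length := by simp; omega
    have htake : (0 :: bs).take (m + 1 + 1) = xs ++ [(0 :: bs).getD (m + 1) 0] := by
      rw [List.getD_eq_getElem _ _ hidx, hxs, ← List.take_concat_get hidx, List.concat_eq_append]
    have hxslen : xs.length = m + 1 := by
      rw [hxs, List.length_take]
      simp at hidx ⊢
      omega
    have hinv := inv_patC xs
    set v := (0 :: bs).getD (m + 1) 0 with hv
    have hpos : ((bsearch (patC xs) v : Nat) : Int) = newd xs v - 1 := pos_eq xs (patC xs) v hinv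
    unfold aStep
    have htoNat : ((m : Int) + 1).toNat = m + 1 := by omega
    simp only [htoNat]
    rw [← hv]
    rw [Prod.mk.injEq]
    constructor
    · -- the LIS component
      rw [htake, dpVec_append', List.map_append, List.set_append]
      have hmaplen : ((dpVec xs).map (fun x => x - 1)).length = m + 1 := by
        rw [List.length_map, length_dpVec, hxslen]
      rw [if_neg (by omega), hmaplen]
      have hrep : n - m = (n - (m + 1)) + 1 := by omega
      rw [hrep, List.replicate_succ]
      simp only [Nat.sub_self, List.set_cons_zero]
      rw [List.append_cons]
      congr 1
      simp only [List.map_cons, List.map_nil]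
      rw [hpos]
    · -- the cache component
      rw [htake]
      unfold patC patStep
      rw [List.foldl_append, List.foldl_cons, List.foldl_nil]

theorem getD_map_sub_one (l : List Int) (k : Nat) (hk : k < l.length) :
    (l.map (fun x => x - 1)).getD k 0 = l.getD k 0 - 1 := by
  rw [List.getD_eq_getElem _ _ (by simpa using hk), List.getElem_map, List.getD_eq_getElem _ _ hk]

theorem main_eq (N : Int) (wires : List (Int × Int)) (hpre : N ≤ (wires.length : Int)) :
    solution N wires = solution_alt N wires := by
  simp only [solution, solution_alt]
  rcases Int.lt_or_le N 0 with hN | hN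
  · -- degenerate: N < 0, both loops are empty and both return [0]
    have hA : PySem.List.pyRange 1 (N + 1) 1 = [] := PySem.List.pyRange_one_eq_nil (by omega)
    have hB : (max N 0).toNat = 0 := by omega
    have hC : PySem.List.pyRange N 0 (-1) = [] := PySem.List.pyRange_neg_one_eq_nil (by omega)
    rw [hA, hB, hC]
    simp [dpLoop, dpInner, PySem.List.pyRange_neg_one_eq_nil, List.range_succ,
      ]
  · -- main case: 0 ≤ N ≤ len(wires)
    obtain ⟨n, rfl⟩ : ∃ n : Nat, N = (n : Int) := ⟨N.toNat, by omega⟩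
    set wiresS := PySem.List.sorted wires (fun x => x.1) with hW
    set bs := wiresS.map (fun p => p.2) with hbs
    have hbslen : bs.length = wires.length := by
      rw [hbs, List.length_map, hW, PySem.List.length_sorted]
    have hnlen : n ≤ bs.length := by omega
    have h1 : ((n : Int) + 1).toNat = n + 1 := by omega
    have h2 : (max ((n : Int)) 0).toNat = n := by omega
    rw [h1, h2]
    rw [aLoop bs n hnlen n (le_refl n)]
    set xsN := (0 :: bs).take (n + 1) with hxsN
    have hxlen : xsN.length = n + 1 := by
      rw [hxsN, List.length_take]
      simp
      omega
    rw [dpLoop_eq (0 :: bs) n (by simp; omega)]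
    simp only [Nat.sub_self, List.replicate_zero, List.append_nil]
    have hl0 : ((patC xsN).length : Int) - 1 = (dpVec xsN).foldl max 0 - 1 := by
      rw [(inv_patC xsN).2.1]
    rw [hl0]
    have hcut : List.foldl (cutStep ((dpVec xsN).map (fun x => x - 1)) (0 :: bs))
          ((dpVec xsN).foldl max 0 - 1, []) (PySem.List.pyRange ((n : Int)) 0 (-1))
        = List.foldl (cutStepB (dpVec xsN) (0 :: bs))
          ((dpVec xsN).foldl max 0 - 1, []) (PySem.List.pyRange ((n : Int)) 0 (-1)) := by
      apply PySem.List.foldl_congr_mem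
      intro st i hi
      rw [PySem.List.mem_pyRange_neg_one] at hi
      unfold cutStep cutStepB
      rw [getD_map_sub_one _ _ (by rw [length_dpVec, hxlen]; omega)]
    rw [hcut]

-- ===== VERDICT (by name: the statement is the Claim_ definition above) =====
theorem solution_spec : Claim_equal_solution := by
  unfold Claim_equal_solution Spec_solution Pre_solution
  intro N wires _hdom hpre
  exact main_eq N wires hpre
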